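-- pv_equiv track=rewrite | github.com/ddmlarm/coding-nine | rosebowl_analytics.py | sort_rosebowl_winners
-- ===== SOURCE A (Python) =====
-- def sort_rosebowl_winners(rosebowl_file_lines):
--     """
--     Returns a sorted list of tuples representing winners of the rosebowl in
--     descendng order, from mnumber of most won to least one games.
--
--     Keyword arguments:
--         rosebowl_file_lines -- a list[str] representing winners of the rosebowl
--         and number of times won.
--     """
--
--     rosebowl_winners = dict()
--
--     for winner in rosebowl_file_lines:
--         if winner in rosebowl_winners:
--             win_count = rosebowl_winners.get(winner)
--             rosebowl_winners.update({winner: win_count+1})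
--         else:
--             rosebowl_winners.update({winner: 1})
--
--     rosebowl_winners_desc = sorted(rosebowl_winners.items(),
--                                    key=lambda item: item[1],
--                                    reverse=True)
--
--     return rosebowl_winners_desc
-- ===== SOURCE B (Python) =====
-- def sort_rosebowl_winners(rosebowl_file_lines):
--     """Count wins per winner, then bucket the (winner, count) pairs by count and
--     emit the buckets from the maximum count down to 1 (a counting/bucket sort,
--     no comparison sort); ties come out in first-appearance order, as a stable
--     sort would give."""
--     counts = {}
--     for winner in rosebowl_file_lines:
--         counts[winner] = counts.get(winner, 0) + 1
--     items = list(counts.items())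
--     max_count = 0
--     for _, c in items:
--         if max_count < c:
--             max_count = c
--     buckets = {}
--     for t in items:
--         buckets.setdefault(t[1], []).append(t)
--     result = []
--     for c in range(max_count, 0, -1):
--         result.extend(buckets.get(c, []))
--     return result
-- ===== Notes on version B (the rewrite author's own statement) =====
-- stated objective: alternative
-- what changed: B keeps the same counting dict but replaces sorted(items, key=count, reverse=True) with a counting-sort sweep: compute the maximum count and emit each count's bucket from max down to 1, preserving first-appearance order within ties.
import Mathlib
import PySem

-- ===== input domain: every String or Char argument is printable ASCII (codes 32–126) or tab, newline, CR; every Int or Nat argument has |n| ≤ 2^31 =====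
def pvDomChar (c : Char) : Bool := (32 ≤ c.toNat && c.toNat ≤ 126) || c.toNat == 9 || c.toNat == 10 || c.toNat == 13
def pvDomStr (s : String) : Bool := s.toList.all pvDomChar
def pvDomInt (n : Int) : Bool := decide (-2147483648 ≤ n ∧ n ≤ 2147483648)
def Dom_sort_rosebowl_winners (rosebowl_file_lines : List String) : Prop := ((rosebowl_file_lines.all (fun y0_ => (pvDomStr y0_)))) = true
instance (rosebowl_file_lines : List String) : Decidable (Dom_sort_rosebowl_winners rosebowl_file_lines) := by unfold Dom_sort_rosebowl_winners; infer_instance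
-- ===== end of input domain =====

-- B replaces the comparison sort by a counting-sort sweep over count values from the maximum
-- down to 1 (stable ties in first-appearance order come out for free); objective: alternative.

-- ===== PORT A =====
-- A's counting loop: 'if winner in d: d.update({winner: d.get(winner)+1}) else: d.update({winner: 1})'
-- (d.get(winner) is always present under the contains guard, so '.getD 0' is exact there)
def pvCountA (rosebowl_file_lines : List String) : PySem.Dict String Int :=
  rosebowl_file_lines.foldl
    (fun d w =>
      if d.contains w then d.insert w ((d.get? w).getD 0 + 1)
      else d.insert w 1)
    PySem.Dict.empty

def sort_rosebowl_winners (rosebowl_file_lines : List String) : List (String × Int) :=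
  PySem.List.sorted (pvCountA rosebowl_file_lines).items (fun item => item.2) true

-- ===== PORT B =====
-- Source B's counting loop: 'counts[winner] = counts.get(winner, 0) + 1'
def pvCountB (rosebowl_file_lines : List String) : PySem.Dict String Int :=
  rosebowl_file_lines.foldl (fun d w => d.insert w (d.getD w 0 + 1)) PySem.Dict.empty

-- Source B's running-maximum loop: 'for _, c in items: if max_count < c: max_count = c'
def pvMaxCount (items : List (String × Int)) : Int :=
  items.foldl (fun acc p => if acc < p.2 then p.2 else acc) 0

def sort_rosebowl_winners_alt (rosebowl_file_lines : List String) : List (String × Int) :=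
  let items := (pvCountB rosebowl_file_lines).items
  let maxCount := pvMaxCount items
  -- 'buckets.setdefault(t[1], []).append(t)' = buckets[t[1]] = buckets.get(t[1], []) + [t],
  -- which is exactly Dict.modify t.2 [] (· ++ [t])
  let buckets := items.foldl (fun b t => b.modify t.2 [] (fun bl => bl ++ [t])) PySem.Dict.empty
  -- 'for c in range(max_count, 0, -1): result.extend(buckets.get(c, []))'
  (PySem.List.pyRange maxCount 0 (-1)).foldl
    (fun result c => result ++ buckets.getD c []) []

-- ===== PRECONDITION & SPEC =====
def Spec_sort_rosebowl_winners (rosebowl_file_lines : List String) (out : List (String × Int)) : Prop := out = sort_rosebowl_winners_alt rosebowl_file_lines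
instance (rosebowl_file_lines : List String) (out : List (String × Int)) : Decidable (Spec_sort_rosebowl_winners rosebowl_file_lines out) := by unfold Spec_sort_rosebowl_winners; infer_instance

-- ===== CLAIM (what is proved, stated in full; the proofs are below) =====
def Claim_equal_sort_rosebowl_winners : Prop := ∀ (rosebowl_file_lines : List String), Dom_sort_rosebowl_winners rosebowl_file_lines → Spec_sort_rosebowl_winners rosebowl_file_lines (sort_rosebowl_winners rosebowl_file_lines)

-- ===== LEMMAS AND PROOFS =====

-- [m, m-1, …, 1] as a proof-side skeleton of B's descending range
def pvDescList : Nat → List Int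
  | 0 => []
  | n + 1 => ((n : Int) + 1) :: pvDescList n

-- the bucket concatenation both programs compute
def pvBucketCat (n : Nat) (l : List (String × Int)) : List (String × Int) :=
  (pvDescList n).flatMap (fun c => l.filter (fun p => p.2 == c))

lemma pvMem_descList (n : Nat) (c : Int) : c ∈ pvDescList n ↔ 1 ≤ c ∧ c ≤ (n : Int) := by
  induction n with
  | zero => simp [pvDescList]; omega
  | succ n ih => simp [pvDescList, ih]; omega

lemma pvSnd_bucket {n : Nat} {l : List (String × Int)} {p : String × Int}
    (h : p ∈ pvBucketCat n l) : 1 ≤ p.2 ∧ p.2 ≤ (n : Int) := by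
  simp only [pvBucketCat, List.mem_flatMap, List.mem_filter, beq_iff_eq] at h
  obtain ⟨c, hc, _, hpc⟩ := h
  rw [pvMem_descList] at hc
  omega

lemma pvDescList_eq_range_map (n : Nat) :
    pvDescList n = (List.range n).map (fun k : Nat => (n : Int) - (k : Int)) := by
  induction n with
  | zero => simp [pvDescList]
  | succ n ih =>
    rw [List.range_succ_eq_map, List.map_cons, List.map_map]
    simp only [pvDescList, ih, List.cons.injEq]
    refine ⟨by push_cast; ring, ?_⟩
    apply List.map_congr_left
    intro k _
    simp only [Function.comp_apply, Nat.succ_eq_add_one]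
    push_cast; ring

lemma pvPyRange_desc (m : Int) (hm : 0 ≤ m) :
    PySem.List.pyRange m 0 (-1) = pvDescList m.toNat := by
  rw [pvDescList_eq_range_map, Int.toNat_of_nonneg hm]
  simp only [PySem.List.pyRange]
  norm_num
  have hif : (if 0 < m then m.toNat else 0) = m.toNat := by split_ifs <;> omega
  rw [hif]
  apply List.map_congr_left
  intro k _
  ring
lemma pvInsertBy_skip (before : (String × Int) → (String × Int) → Bool) (x : String × Int)
    (as bs : List (String × Int)) (h : ∀ y ∈ as, before x y = false) :
    PySem.List.insertBy before x (as ++ bs) = as ++ PySem.List.insertBy before x bs := by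
  induction as with
  | nil => rfl
  | cons a as ih =>
    simp only [List.cons_append, PySem.List.insertBy, h a (List.mem_cons_self), Bool.false_eq_true,
      if_false]
    rw [ih (fun y hy => h y (List.mem_cons_of_mem a hy))]

lemma pvInsertBy_front (before : (String × Int) → (String × Int) → Bool) (x : String × Int)
    (ys : List (String × Int)) (h : ∀ y ∈ ys, before x y = true) :
    PySem.List.insertBy before x ys = x :: ys := by
  cases ys with
  | nil => rfl
  | cons y ys => simp [PySem.List.insertBy, h y (List.mem_cons_self)]

lemma pvFilter_append_of_ne (l : List (String × Int)) (x : String × Int) (c : Int)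
    (h : x.2 ≠ c) : (l ++ [x]).filter (fun p => p.2 == c) = l.filter (fun p => p.2 == c) := by
  have hf : (x.2 == c) = false := beq_eq_false_iff_ne.2 h
  simp [List.filter_append, List.filter, hf]

lemma pvBucketCat_append_of_gt (n : Nat) (x : String × Int) (l : List (String × Int))
    (h : (n : Int) < x.2) : pvBucketCat n (l ++ [x]) = pvBucketCat n l := by
  induction n with
  | zero => simp [pvBucketCat, pvDescList]
  | succ n ih =>
    simp only [pvBucketCat, pvDescList, List.flatMap_cons] at *
    rw [pvFilter_append_of_ne _ _ _ (by push_cast at h ⊢; omega)]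
    rw [ih (by push_cast at h ⊢; omega)]

lemma pvInsert_bucket (n : Nat) (x : String × Int) (l : List (String × Int))
    (h1 : 1 ≤ x.2) (h2 : x.2 ≤ (n : Int)) :
    PySem.List.insertBy (fun a b => decide (b.2 < a.2)) x (pvBucketCat n l)
      = pvBucketCat n (l ++ [x]) := by
  induction n with
  | zero => simp at h2; omega
  | succ n ih =>
    have hcat : ∀ (l' : List (String × Int)), pvBucketCat (n + 1) l'
        = l'.filter (fun p => p.2 == ((n : Int) + 1)) ++ pvBucketCat n l' := by
      intro l'; simp [pvBucketCat, pvDescList]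
    by_cases hx : x.2 = (n : Int) + 1
    · rw [hcat, pvInsertBy_skip _ _ _ _ (by
        intro y hy
        rw [List.mem_filter] at hy
        have := beq_iff_eq.1 hy.2
        simp only [decide_eq_false_iff_not, not_lt]
        omega)]
      rw [pvInsertBy_front _ _ _ (by
        intro y hy
        have := pvSnd_bucket hy
        simp only [decide_eq_true_eq]
        omega)]
      rw [hcat, pvBucketCat_append_of_gt n x l (by omega)]
      rw [List.filter_append]
      simp [List.filter, hx]
    · have hx2 : x.2 ≤ (n : Int) := by push_cast at h2 ⊢; omega
      rw [hcat, pvInsertBy_skip _ _ _ _ (by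
        intro y hy
        rw [List.mem_filter] at hy
        have := beq_iff_eq.1 hy.2
        simp only [decide_eq_false_iff_not, not_lt]
        omega)]
      rw [ih hx2, hcat, pvFilter_append_of_ne _ _ _ hx]

lemma pvFoldl_insert_eq_bucket (n : Nat) (l : List (String × Int))
    (h : ∀ p ∈ l, 1 ≤ p.2 ∧ p.2 ≤ (n : Int)) :
    l.foldl (fun acc x => PySem.List.insertBy (fun a b => decide (b.2 < a.2)) x acc) []
      = pvBucketCat n l := by
  induction l using List.reverseRecOn with
  | nil => simp [pvBucketCat]
  | append_singleton l x ih =>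
    rw [List.foldl_append, List.foldl_cons, List.foldl_nil]
    rw [ih (fun p hp => h p (List.mem_append_left _ hp))]
    exact pvInsert_bucket n x l
      (h x (List.mem_append_right _ (List.mem_singleton.2 rfl))).1
      (h x (List.mem_append_right _ (List.mem_singleton.2 rfl))).2

lemma pvSorted_eq_bucket (n : Nat) (l : List (String × Int))
    (h : ∀ p ∈ l, 1 ≤ p.2 ∧ p.2 ≤ (n : Int)) :
    PySem.List.sorted l (fun item => item.2) true = pvBucketCat n l := by
  rw [PySem.List.sorted_rev_eq_foldl_insertBy]
  exact pvFoldl_insert_eq_bucket n l h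

lemma pvBuckets_getD (items : List (String × Int)) (c : Int) :
    (items.foldl (fun b t => b.modify t.2 [] (fun bl => bl ++ [t])) PySem.Dict.empty).getD c []
      = items.filter (fun t => t.2 == c) := by
  have h1 : items.foldl (fun b t => b.modify t.2 [] (fun bl => bl ++ [t])) PySem.Dict.empty
      = (items.map (fun t => (t.2, t))).foldl
          (fun d p => d.modify p.1 [] (fun bl => bl ++ [p.2])) PySem.Dict.empty := by
    rw [List.foldl_map]
  rw [h1, PySem.Dict.getD_foldl_modify_append]
  simp [List.filter_map, Function.comp_def]

lemma pvCountA_eq_counter (xs : List String) : pvCountA xs = PySem.Dict.counter xs := by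
  rw [← PySem.Dict.foldl_insert_getD_add_one_eq_counter]
  unfold pvCountA
  apply PySem.List.foldl_congr_mem
  intro d w _
  by_cases h : d.contains w
  · rw [if_pos h, PySem.Dict.getD_eq_get?_getD]
  · rw [if_neg h, PySem.Dict.getD_of_not_contains d 0 (by simpa using h)]
    norm_num

lemma pvMaxCount_eq_foldl_max (l : List (String × Int)) :
    pvMaxCount l = l.foldl (fun acc p => max acc p.2) 0 := by
  unfold pvMaxCount
  apply PySem.List.foldl_congr_mem
  intro acc p _
  split_ifs <;> omega

-- ===== VERDICT (by name: the statement is the Claim_ definition above) =====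
theorem sort_rosebowl_winners_spec : Claim_equal_sort_rosebowl_winners := by
  unfold Claim_equal_sort_rosebowl_winners
  intro xs _
  unfold Spec_sort_rosebowl_winners
  have hB : pvCountB xs = PySem.Dict.counter xs :=
    PySem.Dict.foldl_insert_getD_add_one_eq_counter xs
  have hpos : ∀ p ∈ (PySem.Dict.counter xs).items, 1 ≤ p.2 := by
    intro p hp
    rw [PySem.Dict.items_counter] at hp
    obtain ⟨k, hk, rfl⟩ := List.mem_map.1 hp
    have hkx : k ∈ xs := (PySem.Set.mem_ofList xs k).1 hk
    have : 0 < xs.count k := List.count_pos_iff.2 hkx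
    simp only
    omega
  set l := (PySem.Dict.counter xs).items with hl
  set m := l.foldl (fun acc p => max acc p.2) 0 with hm
  have hm0 : 0 ≤ m := (PySem.List.le_foldl_max_int l (fun p => p.2) 0).1
  have hub : ∀ p ∈ l, p.2 ≤ m := (PySem.List.le_foldl_max_int l (fun p => p.2) 0).2
  have hbounds : ∀ p ∈ l, 1 ≤ p.2 ∧ p.2 ≤ ((m.toNat : Nat) : Int) := by
    intro p hp
    have := hub p hp
    have := hpos p hp
    omega
  -- B's value
  have hBval : sort_rosebowl_winners_alt xs = pvBucketCat m.toNat l := by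
    show (PySem.List.pyRange (pvMaxCount (pvCountB xs).items) 0 (-1)).foldl
        (fun result c => result ++
          ((pvCountB xs).items.foldl
            (fun b t => b.modify t.2 [] (fun bl => bl ++ [t])) PySem.Dict.empty).getD c []) []
      = pvBucketCat m.toNat l
    simp only [hB, pvBuckets_getD]
    rw [pvMaxCount_eq_foldl_max, ← hl, ← hm, pvPyRange_desc m hm0,
      PySem.List.foldl_append_eq_flatMap]
    rfl
  -- A's value
  rw [hBval]
  show PySem.List.sorted (pvCountA xs).items (fun item => item.2) true = pvBucketCat m.toNat l
  rw [pvCountA_eq_counter, ← hl]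
  exact pvSorted_eq_bucket m.toNat l hbounds
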